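-- pv_equiv track=rewrite | github.com/offbyoni/adventOfCode2017 | 6/reallocate.py | reallocationCount
-- ===== SOURCE A (Python) =====
-- def reallocationCount(banks):
--     previousStates = list()
--     count = 0
--     while banks not in previousStates:
--         previousStates.append(list(banks))
--         banks = reallocate(banks)
--         count += 1
--     return count
--
-- def reallocate(banks):
--     highestBankIndex = highestBank(banks)
--     banks, blocks = clearHighestBank(banks, highestBankIndex)
--     return redistribute(banks, blocks, highestBankIndex)
--
-- def highestBank(banks):
--     if len(banks) < 1:
--         raise Exception('no banks')
--     maxValue = max(banks)
--     highestBankIndex = banks.index(maxValue)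
--     return highestBankIndex
--
-- def clearHighestBank(banks, highestBankIndex):
--     if len(banks) < 1:
--         raise Exception('no banks')
--     if highestBankIndex > len(banks) - 1 or highestBankIndex < 0:
--         raise Exception('index out of bounds')
--     blocks = banks[highestBankIndex]
--     banks[highestBankIndex] = 0
--     return banks, blocks
--
-- def redistribute(banks, blocks, highestBankIndex):
--     for i in range (0, blocks):
--         highestBankIndex = (highestBankIndex + 1) % len(banks)
--         banks[highestBankIndex] += 1
--     return banks
-- ===== SOURCE B (Python) =====
-- def reallocationCount(banks):
--     seen = set()
--     count = 0
--     state = tuple(banks)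
--     while state not in seen:
--         seen.add(state)
--         banks = _spread(list(banks))
--         state = tuple(banks)
--         count += 1
--     return count
--
--
-- def _spread(b):
--     """One reallocation round in O(len(b)) via closed-form arithmetic."""
--     n = len(b)
--     m = max(b)
--     i = b.index(m)
--     if m <= 0:
--         b[i] = 0
--         return b
--     q, r = divmod(m, n)
--     out = [v + q for v in b]
--     out[i] = q
--     for j in range(1, r + 1):
--         out[(i + j) % n] += 1
--     return out
-- ===== Notes on version B (the rewrite author's own statement) =====
-- stated objective: alternative
-- what changed: The per-unit ring-walk redistribution (one +1 per block) is replaced by closed-form divmod arithmetic (+blocks//n to every bank, +1 to the blocks%n banks after the cleared maximum), and the list-of-lists history with linear membership scans is replaced by a set of tuples; B does not mutate the caller's list (A clears/increments it in place on the first round).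
import Mathlib
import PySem

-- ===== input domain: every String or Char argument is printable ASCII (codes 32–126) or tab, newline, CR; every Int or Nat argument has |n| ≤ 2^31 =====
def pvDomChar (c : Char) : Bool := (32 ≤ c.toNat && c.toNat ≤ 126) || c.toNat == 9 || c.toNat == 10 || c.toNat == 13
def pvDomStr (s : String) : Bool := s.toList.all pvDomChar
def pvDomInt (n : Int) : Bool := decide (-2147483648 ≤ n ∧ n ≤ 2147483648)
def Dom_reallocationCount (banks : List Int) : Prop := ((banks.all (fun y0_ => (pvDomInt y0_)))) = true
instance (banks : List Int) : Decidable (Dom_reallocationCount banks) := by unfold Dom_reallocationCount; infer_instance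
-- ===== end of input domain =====

-- B replaces A's per-unit ring walk by closed-form divmod arithmetic per round and the
-- list-of-lists history by a set; return values are proved equal — A mutates the caller's list
-- in place on the first round, B does not (the equivalence is about the return value only).

-- ===== PORT A =====
-- while loops are ported with fuel; pvFuel is an upper bound on the number of iterations
-- (a crude bound on the number of reachable configurations, plus slack).
def pvFuel (banks : List Int) : Nat :=
  (2 * (banks.length + 2) * ((banks.map Int.natAbs).sum + 1) + 1) ^ banks.length + 2

def pvHighestBank (banks : List Int) : Int :=
  match PySem.List.max? banks (fun y => y) with
  | none => 0  -- Python raises 'no banks' here; excluded by Pre_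
  | some m => (((PySem.List.index? banks m).getD 0 : Nat) : Int)

-- clearHighestBank: blocks = banks[i]; banks[i] = 0  (index is always in range when called)
def pvClearBlocks (banks : List Int) (i : Int) : List Int × Int :=
  (PySem.List.pySetD banks i 0, PySem.List.pyGetD banks i 0)

def pvRedistribute (banks : List Int) (blocks : Int) (i : Int) : List Int :=
  ((PySem.List.pyRange 0 blocks 1).foldl
    (fun st _ =>
      let idx := PySem.Int.mod (st.2 + 1) ((st.1.length : Int))
      (PySem.List.pySetD st.1 idx (PySem.List.pyGetD st.1 idx 0 + 1), idx))
    (banks, i)).1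

def pvReallocate (banks : List Int) : List Int :=
  let i := pvHighestBank banks
  let p := pvClearBlocks banks i
  pvRedistribute p.1 p.2 i

def pvLoopA : Nat → List (List Int) → List Int → Int → Int
  | 0, _, _, count => count
  | f + 1, prev, banks, count =>
    if banks ∈ prev then count
    else pvLoopA f (prev ++ [banks]) (pvReallocate banks) (count + 1)

def reallocationCount (banks : List Int) : Int := pvLoopA (pvFuel banks) [] banks 0

-- ===== PORT B =====
-- one round of Source B's _spread: clear the first maximal bank, add m // n everywhere,
-- +1 on the m % n banks clockwise after it (indices are nonneg, so .toNat is exact)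
def pvSpread (b : List Int) : List Int :=
  let n := b.length
  let m := (PySem.List.max? b (fun y => y)).getD 0   -- max(b); raises on [] in Python (Pre_)
  let i := (PySem.List.index? b m).getD 0
  if m ≤ 0 then b.set i 0
  else
    let q := PySem.Int.floordiv m (n : Int)
    let r := PySem.Int.mod m (n : Int)
    (PySem.List.pyRange 1 (r + 1) 1).foldl
      (fun out t => out.modify ((PySem.Int.mod ((i : Int) + t) (n : Int)).toNat) (· + 1))
      ((b.map (· + q)).set i q)

def pvLoopB : Nat → PySem.Set (List Int) → List Int → Int → Int
  | 0, _, _, count => count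
  | f + 1, seen, state, count =>
    if state ∈ seen then count
    else pvLoopB f (PySem.Set.add seen state) (pvSpread state) (count + 1)

def reallocationCount_alt (banks : List Int) : Int :=
  pvLoopB (pvFuel banks) PySem.Set.empty banks 0

-- ===== PRECONDITION & SPEC =====
-- Pre_ excludes only the empty list, on which Python A raises Exception('no banks').
def Pre_reallocationCount (banks : List Int) : Prop := banks ≠ []
instance (banks : List Int) : Decidable (Pre_reallocationCount banks) := by
  unfold Pre_reallocationCount; infer_instance
def pvWitness_reallocationCount : List Int := [0, 2, 7, 0]

def Spec_reallocationCount (banks : List Int) (out : Int) : Prop := out = reallocationCount_alt banks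
instance (banks : List Int) (out : Int) : Decidable (Spec_reallocationCount banks out) := by
  unfold Spec_reallocationCount; infer_instance

-- ===== CLAIM (what is proved, stated in full; the proofs are below) =====
def Claim_equal_reallocationCount : Prop := ∀ (banks : List Int), Dom_reallocationCount banks → Pre_reallocationCount banks → Spec_reallocationCount banks (reallocationCount banks)

-- ===== LEMMAS AND PROOFS =====

-- A's ring walk as a recursion on the number of remaining unit blocks
def pvWalk : List Int → Nat → Nat → List Int
  | b, _, 0 => b
  | b, i, k + 1 => pvWalk (b.modify ((i + 1) % b.length) (· + 1)) ((i + 1) % b.length) k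

-- the indices the walk touches
def pvIdxs (n i k : Nat) : List Nat := (List.range k).map (fun t => (i + t + 1) % n)

def pvBumpFold (ts : List Nat) (c : List Int) : List Int :=
  ts.foldl (fun acc j => acc.modify j (· + 1)) c

theorem pv_modify_eq_set (c : List Int) (j : Nat) (_hj : j < c.length) :
    c.modify j (· + 1) = c.set j (c.getD j 0 + 1) := by
  rw [List.modify_eq_set, List.getD_eq_getElem?_getD]
  rfl

theorem pvFoldA_eq (l : List Int) : ∀ (c : List Int) (i : Nat), i < c.length →
    (l.foldl
      (fun st (_ : Int) =>
        (PySem.List.pySetD st.1 (PySem.Int.mod (st.2 + 1) ((st.1.length : Int)))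
            (PySem.List.pyGetD st.1 (PySem.Int.mod (st.2 + 1) ((st.1.length : Int))) 0 + 1),
          PySem.Int.mod (st.2 + 1) ((st.1.length : Int))))
      (c, (i : Int)))
    = (pvWalk c i l.length, (((i + l.length) % c.length : Nat) : Int)) := by
  induction l with
  | nil =>
    intro c i hi
    simp [pvWalk, Nat.mod_eq_of_lt hi]
  | cons x xs ih =>
    intro c i hi
    have hmod : (i + 1) % c.length < c.length := Nat.mod_lt _ (by omega)
    simp only [List.foldl_cons]
    have hcast : ((i : Int) + 1) = ((i + 1 : Nat) : Int) := by push_cast; ring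
    rw [show ((c, (i : Int)).2 + 1) = ((i + 1 : Nat) : Int) from hcast]
    simp only [PySem.Int.mod_natCast, PySem.List.pySetD_natCast, PySem.List.pyGetD_natCast]
    rw [← pv_modify_eq_set c _ hmod, ih _ _ (by rw [List.length_modify]; exact hmod)]
    have hlen : (c.modify ((i + 1) % c.length) (· + 1)).length = c.length := List.length_modify ..
    rw [hlen]
    rw [Prod.mk.injEq]
    refine ⟨by simp only [List.length_cons]; rfl, ?_⟩
    simp only [List.length_cons]
    congr 1
    rw [Nat.mod_add_mod]
    congr 1
    omega

theorem pvWalk_eq_fold : ∀ (k : Nat) (c : List Int) (i : Nat),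
    pvWalk c i k = pvBumpFold (pvIdxs c.length i k) c := by
  intro k
  induction k with
  | zero => intro c i; simp [pvWalk, pvIdxs, pvBumpFold]
  | succ k ih =>
    intro c i
    show pvWalk (c.modify ((i + 1) % c.length) (· + 1)) ((i + 1) % c.length) k = _
    rw [ih]
    have hlen : (c.modify ((i + 1) % c.length) (· + 1)).length = c.length := List.length_modify ..
    rw [hlen]
    have hidx : pvIdxs c.length i (k + 1)
        = ((i + 1) % c.length) :: pvIdxs c.length ((i + 1) % c.length) k := by
      unfold pvIdxs
      rw [List.range_succ_eq_map, List.map_cons, List.map_map]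
      congr 1
      apply List.map_congr_left
      intro t _
      show (i + Nat.succ t + 1) % c.length = ((i + 1) % c.length + t + 1) % c.length
      conv_rhs => rw [Nat.add_assoc, Nat.mod_add_mod]
      congr 1
      omega
    rw [hidx]
    rfl

theorem pv_length_bumpFold : ∀ (ts : List Nat) (c : List Int),
    (pvBumpFold ts c).length = c.length := by
  intro ts
  induction ts with
  | nil => intro c; rfl
  | cons t ts ih =>
    intro c
    show (pvBumpFold ts (c.modify t (· + 1))).length = _
    rw [ih, List.length_modify]

theorem pv_getD_bumpFold : ∀ (ts : List Nat) (c : List Int) (j : Nat) (_hj : j < c.length),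
    (pvBumpFold ts c).getD j 0 = c.getD j 0 + (ts.count j : Int) := by
  intro ts
  induction ts with
  | nil => intro c j hj; simp [pvBumpFold]
  | cons t ts ih =>
    intro c j hj
    show (pvBumpFold ts (c.modify t (· + 1))).getD j 0 = _
    rw [ih _ _ (by rw [List.length_modify]; exact hj)]
    have hget : (c.modify t (· + 1)).getD j 0
        = c.getD j 0 + if t = j then 1 else 0 := by
      rw [List.getD_eq_getElem _ _ (by rw [List.length_modify]; exact hj),
        List.getD_eq_getElem _ _ hj, List.getElem_modify]
      split <;> simp
    rw [hget, List.count_cons]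
    by_cases h : t = j
    · subst h
      simp only [beq_self_eq_true, if_true]
      push_cast
      ring
    · have hb : (t == j) = false := by simp [h]
      simp only [hb, if_neg h, Bool.false_eq_true, if_false]
      push_cast
      ring

theorem pv_mod_small_add (a b n : Nat) (ha : a < n) (hb : b < n) :
    (a + b) % n = if a + b < n then a + b else a + b - n := by
  split_ifs with h
  · exact Nat.mod_eq_of_lt h
  · rw [Nat.mod_eq_sub_mod (by omega), Nat.mod_eq_of_lt (by omega)]

theorem pv_count_block (n base j : Nat) (hn : 0 < n) (hj : j < n) :
    ((List.range n).map (fun t => (base + t) % n)).count j = 1 := by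
  have hb : base % n < n := Nat.mod_lt _ hn
  set t0 : Nat := (j + n - base % n) % n with ht0
  have ht0lt : t0 < n := Nat.mod_lt _ hn
  have ht0v : t0 = if base % n ≤ j then j - base % n else j + n - base % n := by
    rw [ht0]
    split_ifs with h
    · rw [Nat.mod_eq_sub_mod (by omega), Nat.mod_eq_of_lt (by omega)]
      omega
    · exact Nat.mod_eq_of_lt (by omega)
  have key : ∀ t, t < n → (((base + t) % n = j) ↔ t = t0) := by
    intro t ht
    have h1 : (base + t) % n = (base % n + t) % n := by
      conv_lhs => rw [← Nat.mod_add_mod]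
    rw [h1, pv_mod_small_add _ _ _ hb ht]
    rw [ht0v]
    split_ifs <;> omega
  rw [List.count_eq_countP, List.countP_map]
  have : List.countP ((fun x => x == j) ∘ fun t => (base + t) % n) (List.range n)
      = List.countP (fun t => t == t0) (List.range n) := by
    apply List.countP_congr
    intro t htmem
    have ht : t < n := List.mem_range.mp htmem
    simp only [Function.comp, beq_iff_eq]
    exact key t ht
  rw [this, ← List.count_eq_countP]
  exact List.count_eq_one_of_mem (List.nodup_range) (List.mem_range.mpr ht0lt)

theorem pv_count_add (n i a j : Nat) (hn : 0 < n) (hj : j < n) :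
    (pvIdxs n i (a + n)).count j = (pvIdxs n i a).count j + 1 := by
  unfold pvIdxs
  rw [List.range_add, List.map_append, List.count_append, List.map_map]
  congr 1
  have : ((fun t => (i + t + 1) % n) ∘ fun x => a + x) = fun t => ((i + a + 1) + t) % n := by
    funext t
    show (i + (a + t) + 1) % n = ((i + a + 1) + t) % n
    congr 1
    omega
  rw [this]
  exact pv_count_block n (i + a + 1) j hn hj

theorem pv_count_full (n i s j : Nat) (hn : 0 < n) (hj : j < n) :
    ∀ q : Nat, (pvIdxs n i (q * n + s)).count j = q + (pvIdxs n i s).count j := by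
  intro q
  induction q with
  | zero => simp
  | succ q ih =>
    have : (q + 1) * n + s = (q * n + s) + n := by ring
    rw [this, pv_count_add n i _ j hn hj, ih]
    omega

theorem pv_count_split (n i k j : Nat) (hn : 0 < n) (hj : j < n) :
    (pvIdxs n i k).count j = k / n + (pvIdxs n i (k % n)).count j := by
  conv_lhs => rw [show k = (k / n) * n + k % n by
    rw [Nat.mul_comm]; exact (Nat.div_add_mod k n).symm]
  exact pv_count_full n i (k % n) j hn hj (k / n)

theorem pv_bumpFold_shift (c : List Int) (i k : Nat) (hn : 0 < c.length) :
    pvBumpFold (pvIdxs c.length i k) c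
      = pvBumpFold (pvIdxs c.length i (k % c.length)) (c.map (· + ((k / c.length : Nat) : Int))) := by
  have hlenmap : (c.map (· + ((k / c.length : Nat) : Int))).length = c.length := by simp
  apply List.ext_getElem
  · rw [pv_length_bumpFold, pv_length_bumpFold, hlenmap]
  · intro j h1 h2
    rw [pv_length_bumpFold] at h1
    have hj : j < c.length := h1
    rw [← List.getD_eq_getElem _ 0 h2, ← List.getD_eq_getElem _ 0 (by
      rw [pv_length_bumpFold]; exact h1)]
    rw [pv_getD_bumpFold _ _ _ hj, pv_getD_bumpFold _ _ _ (by rw [hlenmap]; exact hj)]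
    have hmap : (c.map (· + ((k / c.length : Nat) : Int))).getD j 0
        = c.getD j 0 + ((k / c.length : Nat) : Int) := by
      rw [List.getD_eq_getElem _ 0 (by rw [hlenmap]; exact hj), List.getD_eq_getElem _ 0 hj,
        List.getElem_map]
    rw [hmap, pv_count_split c.length i k j hn hj]
    push_cast
    ring

theorem pv_step_eq (b : List Int) : pvReallocate b = pvSpread b := by
  rcases hmax : PySem.List.max? b (fun y => y) with _ | m
  · have hb : b = [] := (PySem.List.max?_eq_none_iff b _).mp hmax
    subst hb
    rfl
  · have hmem : m ∈ b := PySem.List.max?_mem hmax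
    have hsome : (PySem.List.index? b m).isSome := (PySem.List.index?_isSome_iff b m).mpr hmem
    rcases hidx : PySem.List.index? b m with _ | i
    · rw [hidx] at hsome; simp at hsome
    · obtain ⟨hik, hbi, -⟩ := PySem.List.getElem_of_index?_eq_some hidx
      simp only [pvReallocate, pvHighestBank, pvClearBlocks, pvRedistribute, pvSpread,
        hmax, hidx, Option.getD_some]
      rw [PySem.List.pyGetD_natCast, PySem.List.pySetD_natCast,
        List.getD_eq_getElem _ _ hik, hbi]
      have hi' : i < (b.set i 0).length := by simpa using hik
      rw [pvFoldA_eq (PySem.List.pyRange 0 m) (b.set i 0) i hi']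
      show pvWalk (b.set i 0) i (PySem.List.pyRange 0 m).length = _
      rw [PySem.List.length_pyRange_one]
      by_cases hm : m ≤ 0
      · rw [if_pos hm]
        have h0 : (m - 0).toNat = 0 := by omega
        rw [h0]
        rfl
      · rw [if_neg hm]
        have hk : (m - 0).toNat = m.toNat := by omega
        have hmk : m = ((m.toNat : Nat) : Int) := (Int.toNat_of_nonneg (by omega)).symm
        rw [hk, pvWalk_eq_fold, pv_bumpFold_shift _ _ _ (by simp; omega)]
        rw [hmk]
        rw [PySem.Int.floordiv_natCast, PySem.Int.mod_natCast]
        simp only [List.length_set]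
        rw [List.map_set, zero_add]
        rw [PySem.List.pyRange_one]
        have htn : (((m.toNat % b.length : Nat) : Int) + 1 - 1).toNat = m.toNat % b.length := by
          omega
        rw [htn, List.foldl_map]
        unfold pvBumpFold pvIdxs
        rw [List.foldl_map]
        congr 1
        funext acc t
        congr 1
        have hc : ((i : Int) + (1 + (t : Int))) = ((i + t + 1 : Nat) : Int) := by
          push_cast; ring
        rw [hc, PySem.Int.mod_natCast, Int.toNat_natCast]

theorem pv_loop_eq : ∀ (f : Nat) (prev : List (List Int)) (banks : List Int) (count : Int),
    pvLoopA f prev banks count = pvLoopB f prev banks count := by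
  intro f
  induction f with
  | zero => intro prev banks count; rfl
  | succ f ih =>
    intro prev banks count
    show (if banks ∈ prev then count
          else pvLoopA f (prev ++ [banks]) (pvReallocate banks) (count + 1))
        = (if banks ∈ prev then count
          else pvLoopB f (PySem.Set.add prev banks) (pvSpread banks) (count + 1))
    by_cases h : banks ∈ prev
    · rw [if_pos h, if_pos h]
    · rw [if_neg h, if_neg h, PySem.Set.add_of_not_mem h, pv_step_eq, ih]

-- ===== VERDICT (by name: the statement is the Claim_ definition above) =====
theorem reallocationCount_spec : Claim_equal_reallocationCount := by
  intro banks _ _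
  unfold Spec_reallocationCount reallocationCount reallocationCount_alt
  exact pv_loop_eq _ _ _ _
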